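-- pv_equiv track=rewrite | github.com/TrinchaS/17-860-12-TRELEW_4 | Modulo_4/clase_10.py | reversa3
-- ===== SOURCE A (Python) =====
-- def reversa3(vector):
-- 	pos = 0
-- 	rta = []
-- 	for v in (vector):
-- 		if (pos % 3):
-- 			rta.append(v)
-- 		pos += 1
-- 	return rta[::-1]
-- ===== SOURCE B (Python) =====
-- def reversa3(vector):
--     vector = list(vector)
--     res = []
--     for i in range(len(vector) - 1, -1, -1):
--         if i % 3:
--             res.append(vector[i])
--     return res
-- ===== Notes on version B (the rewrite author's own statement) =====
-- stated objective: alternative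
-- what changed: Instead of appending kept elements forward and reversing at the end, B iterates indices in descending order and builds the reversed result directly, so no separate reverse pass is needed.
import Mathlib
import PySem

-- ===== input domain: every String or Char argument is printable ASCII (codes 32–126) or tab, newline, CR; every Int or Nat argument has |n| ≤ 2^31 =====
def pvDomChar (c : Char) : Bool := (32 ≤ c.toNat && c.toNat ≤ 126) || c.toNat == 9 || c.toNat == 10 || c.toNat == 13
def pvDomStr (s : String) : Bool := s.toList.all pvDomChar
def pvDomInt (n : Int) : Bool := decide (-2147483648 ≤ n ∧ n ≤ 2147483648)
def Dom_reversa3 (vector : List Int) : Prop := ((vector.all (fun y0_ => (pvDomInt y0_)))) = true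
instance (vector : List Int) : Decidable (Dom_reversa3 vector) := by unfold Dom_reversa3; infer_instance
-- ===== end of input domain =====

-- B builds the reversed result directly by iterating indices in descending order, instead of appending forward and reversing at the end.


-- ===== PORT A =====
-- pos counter and rta accumulator as in A; final rta[::-1] via slice?
def reversa3 (vector : List Int) : List Int :=
  let st := vector.foldl
    (fun (st : Int × List Int) v =>
      (st.1 + 1, if PySem.Int.mod st.1 3 ≠ 0 then st.2 ++ [v] else st.2))
    (0, [])
  (PySem.List.slice? st.2 none none (-1)).getD []

-- ===== PORT B =====
-- for i in range(len(vector)-1, -1, -1): if i % 3: res.append(vector[i])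
def reversa3_alt (vector : List Int) : List Int :=
  (PySem.List.pyRange ((vector.length : Int) - 1) (-1) (-1)).foldl
    (fun res i => if PySem.Int.mod i 3 ≠ 0 then res ++ [PySem.List.pyGetD vector i 0] else res)
    []

-- ===== PRECONDITION & SPEC =====
def Spec_reversa3 (vector : List Int) (out : List Int) : Prop := out = reversa3_alt vector
instance (vector : List Int) (out : List Int) : Decidable (Spec_reversa3 vector out) := by unfold Spec_reversa3; infer_instance

-- ===== CLAIM (what is proved, stated in full; the proofs are below) =====
def Claim_equal_reversa3 : Prop := ∀ (vector : List Int), Dom_reversa3 vector → Spec_reversa3 vector (reversa3 vector)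

-- ===== LEMMAS AND PROOFS =====

-- elements of xs at running index p, p+1, … whose index is not a multiple of 3
def specKeep : List Int → Nat → List Int
  | [], _ => []
  | x :: xs, p => (if p % 3 ≠ 0 then [x] else []) ++ specKeep xs (p + 1)

theorem reversa3_foldl (xs : List Int) (p : Nat) (acc : List Int) :
    (xs.foldl
      (fun (st : Int × List Int) v =>
        (st.1 + 1, if PySem.Int.mod st.1 3 ≠ 0 then st.2 ++ [v] else st.2))
      ((p : Int), acc)).2 = acc ++ specKeep xs p := by
  induction xs generalizing p acc with
  | nil => simp [specKeep]
  | cons x xs ih =>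
    have hcast : ((p : Int) + 1) = ((p + 1 : Nat) : Int) := by push_cast; ring
    have hmod : PySem.Int.mod (p : Int) 3 = ((p % 3 : Nat) : Int) := by
      exact_mod_cast PySem.Int.mod_natCast p 3
    simp only [List.foldl_cons, hmod]
    by_cases h : p % 3 = 0
    · rw [if_neg (by simp [h]), hcast, ih]
      simp [specKeep, h]
    · rw [if_pos (by exact_mod_cast h), hcast, ih]
      simp [specKeep, h]

theorem specKeep_eq_range (orig xs : List Int) (s : Nat) (hdrop : xs = orig.drop s) :
    ((PySem.List.pyRange (s : Int) (orig.length : Int) 1).filter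
        (fun i => decide (PySem.Int.mod i 3 ≠ 0))).map
      (fun i => PySem.List.pyGetD orig i 0) = specKeep xs s := by
  induction xs generalizing s with
  | nil =>
    have hlen : orig.length ≤ s := by
      by_contra h
      have := List.drop_eq_nil_iff.mp hdrop.symm
      omega
    rw [PySem.List.pyRange_one_eq_nil (by exact_mod_cast hlen)]
    simp [specKeep]
  | cons x xs ih =>
    have hs : s < orig.length := by
      by_contra h
      rw [List.drop_eq_nil_of_le (by omega)] at hdrop
      exact List.cons_ne_nil x xs hdrop
    have hcd : orig[s]'hs :: orig.drop (s + 1) = x :: xs := by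
      rw [List.getElem_cons_drop, ← hdrop]
    have hx : x = orig[s]'hs := by injection hcd with h1 h2; exact h1.symm
    have hxs : xs = orig.drop (s + 1) := by injection hcd with h1 h2; exact h2.symm
    have hmod : PySem.Int.mod (s : Int) 3 = ((s % 3 : Nat) : Int) := by
      exact_mod_cast PySem.Int.mod_natCast s 3
    have hget : PySem.List.pyGetD orig (s : Int) 0 = x := by
      rw [PySem.List.pyGetD_eq_getElem orig 0 (by positivity) (by exact_mod_cast hs)]
      simp [hx]
    have hcast : ((s : Int) + 1) = ((s + 1 : Nat) : Int) := by push_cast; ring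
    have hrest := ih (s + 1) hxs
    rw [PySem.List.pyRange_one_cons (by exact_mod_cast hs), List.filter_cons]
    have hc : decide (PySem.Int.mod (s : Int) 3 ≠ 0) = decide (s % 3 ≠ 0) := by
      rw [hmod]; simp; omega
    rw [hc]
    by_cases h : s % 3 = 0
    · rw [if_neg (by simp [h]), hcast, hrest]
      simp [specKeep, h]
    · rw [if_pos (by simp [h])]
      simp only [List.map_cons, hget, hcast, hrest]
      simp [specKeep, h]

theorem reversa3_alt_eq (vector : List Int) :
    reversa3_alt vector = (specKeep vector 0).reverse := by
  unfold reversa3_alt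
  have hfold := PySem.List.foldl_append_if (fun i => decide (PySem.Int.mod i 3 ≠ 0))
      (fun i => PySem.List.pyGetD vector i 0)
      (PySem.List.pyRange ((vector.length : Int) - 1) (-1) (-1)) []
  simp only [decide_eq_true_eq] at hfold
  rw [hfold]
  have h1 : PySem.List.pyRange ((vector.length : Int) - 1) (-1) (-1)
      = (PySem.List.pyRange 0 (vector.length : Int) 1).reverse := by
    rw [PySem.List.pyRange_neg_one_eq_reverse]
    norm_num
  rw [h1, List.filter_reverse, List.map_reverse, List.nil_append]
  congr 1
  exact specKeep_eq_range vector vector 0 rfl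

-- ===== VERDICT (by name: the statement is the Claim_ definition above) =====
theorem reversa3_spec : Claim_equal_reversa3 := by
  intro vector _
  unfold Spec_reversa3 reversa3
  rw [reversa3_alt_eq]
  simp only [PySem.List.slice?_none_none_neg_one, Option.getD_some]
  congr 1
  simpa using reversa3_foldl vector 0 []
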